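-- pv_equiv track=rewrite | github.com/sutd-automated-programming-tools/clara-s | tests/data/midterm/midterm/2018366/Q6/submission_1/q6_work.py | get_stationline
-- ===== SOURCE A (Python) =====
-- def get_stationline(mrt):
--     dic=dict()
--     for i in mrt:
--         for x in mrt[i]:
--             dic[x]=''
--     for i in mrt:
--         for x in mrt[i]:
--             dic[x]+=i
--     return dic
-- ===== SOURCE B (Python) =====
-- def get_stationline(mrt):
--     # Transposed algorithm: first collect the distinct stations in first-encounter
--     # order, then for each station build its line string directly from per-line
--     # occurrence counts (line * count), instead of accumulating events into a dict.
--     items = list(mrt.items())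
--     stations = []
--     seen = set()
--     for line, sts in items:
--         for x in sts:
--             if x not in seen:
--                 seen.add(x)
--                 stations.append(x)
--
--     def lines_of(x):
--         acc = ''
--         for line, sts in items:
--             acc += line * sts.count(x)
--         return acc
--
--     return {x: lines_of(x) for x in stations}
-- ===== Notes on version B (the rewrite author's own statement) =====
-- stated objective: alternative
-- what changed: Replaces A's two event-accumulation passes over a dict with a transposed per-station aggregation: collect distinct stations in first-encounter order, then compute each station's string directly as the concatenation of line*count(line,station) over the lines.
import Mathlib
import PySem

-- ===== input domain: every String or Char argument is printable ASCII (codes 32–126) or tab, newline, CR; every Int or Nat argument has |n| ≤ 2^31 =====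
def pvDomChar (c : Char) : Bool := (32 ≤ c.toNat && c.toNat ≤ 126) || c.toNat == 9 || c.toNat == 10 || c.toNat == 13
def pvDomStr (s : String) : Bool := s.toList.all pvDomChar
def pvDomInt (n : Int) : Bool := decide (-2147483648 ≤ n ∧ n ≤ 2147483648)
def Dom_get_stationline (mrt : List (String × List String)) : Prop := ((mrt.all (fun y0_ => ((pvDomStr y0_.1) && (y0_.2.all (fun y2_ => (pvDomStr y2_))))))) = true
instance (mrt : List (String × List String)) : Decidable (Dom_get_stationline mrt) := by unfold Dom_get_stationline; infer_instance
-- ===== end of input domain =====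

-- B replaces A's two event-accumulation passes over a dict by a transposed
-- per-station aggregation (distinct stations in first-encounter order, then
-- line * count per line); objective: alternative algorithm, not faster.

-- ===== PORT A =====
-- the dict argument arrives as an association list; dict(mrt) = PySem.Dict.ofList mrt.
-- dic[x] += i is ported totally as getD with "" — A's first pass guarantees x is present,
-- so the default is never consulted on inputs A accepts (A is total).
def get_stationline (mrt : List (String × List String)) : List (String × String) :=
  let m := PySem.Dict.ofList mrt
  let dic : PySem.Dict String String :=
    m.items.foldl (fun d p =>
      (m.getD p.1 []).foldl (fun d x => d.insert x "") d) PySem.Dict.empty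
  let dic :=
    m.items.foldl (fun d p =>
      (m.getD p.1 []).foldl (fun d x => d.insert x (d.getD x "" ++ p.1)) d) dic
  dic.items

-- ===== PORT B =====
-- exact port of Python's str * int for a nonnegative count (list.count is ≥ 0)
def pvStrMul (s : String) : Nat → String
  | 0 => ""
  | n + 1 => s ++ pvStrMul s n

-- Source B's `seen` set together with the `stations` list is exactly PySem.Set
-- (add appends only unseen elements, keeping first-encounter order).
def get_stationline_alt (mrt : List (String × List String)) : List (String × String) :=
  let items := (PySem.Dict.ofList mrt).items
  let stations : PySem.Set String :=
    items.foldl (fun s p => p.2.foldl (fun s x => PySem.Set.add s x) s) PySem.Set.empty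
  let linesOf : String → String := fun x =>
    items.foldl (fun acc p => acc ++ pvStrMul p.1 (p.2.count x)) ""
  stations.map (fun x => (x, linesOf x))

-- ===== PRECONDITION & SPEC =====
def Spec_get_stationline (mrt : List (String × List String)) (out : List (String × String)) : Prop := out = get_stationline_alt mrt
instance (mrt : List (String × List String)) (out : List (String × String)) : Decidable (Spec_get_stationline mrt out) := by unfold Spec_get_stationline; infer_instance

-- ===== CLAIM (what is proved, stated in full; the proofs are below) =====
def Claim_equal_get_stationline : Prop := ∀ (mrt : List (String × List String)), Dom_get_stationline mrt → Spec_get_stationline mrt (get_stationline mrt)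

-- ===== LEMMAS AND PROOFS =====

-- A's accumulating step, over the flattened list of (station, line) events
def pvUpd (d : PySem.Dict String String) (s : String × String) : PySem.Dict String String :=
  d.insert s.1 (d.getD s.1 "" ++ s.2)

-- the initialization step of A's first pass
def pvIni (d : PySem.Dict String String) (s : String × String) : PySem.Dict String String :=
  d.insert s.1 ""

-- value accumulated for station x over the events
def pvCat (l : List (String × String)) (x : String) : String :=
  match l with
  | [] => ""
  | s :: l => (if s.1 = x then s.2 else "") ++ pvCat l x

-- the flattened (station, line) events of a dict's items, in traversal order
def pvEvents (items : List (String × List String)) : List (String × String) :=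
  items.flatMap (fun p => p.2.map (fun x => (x, p.1)))

theorem pvCat_append (l₁ l₂ : List (String × String)) (x : String) :
    pvCat (l₁ ++ l₂) x = pvCat l₁ x ++ pvCat l₂ x := by
  induction l₁ with
  | nil => simp [pvCat]
  | cons s l ih => simp [pvCat, ih, String.append_assoc]

-- value accumulated by the pvUpd fold
theorem pvGetD_upd (l : List (String × String)) (d : PySem.Dict String String) (x : String) :
    (l.foldl pvUpd d).getD x "" = d.getD x "" ++ pvCat l x := by
  induction l generalizing d with
  | nil => simp [pvCat]
  | cons s l ih =>
    simp only [List.foldl_cons, ih, pvUpd, pvCat, PySem.Dict.getD_insert]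
    by_cases h : x = s.1
    · subst h; simp [String.append_assoc]
    · simp [h, Ne.symm h]

-- A's first pass sets every station that occurs to ""
theorem pvGetD_ini (l : List (String × String)) (d : PySem.Dict String String) (x : String) :
    (l.foldl pvIni d).getD x "" = if x ∈ l.map (·.1) then "" else d.getD x "" := by
  induction l generalizing d with
  | nil => simp
  | cons s l ih =>
    simp only [List.foldl_cons, ih, pvIni, PySem.Dict.getD_insert, List.map_cons, List.mem_cons]
    by_cases hm : x ∈ l.map (·.1) <;> by_cases h : x = s.1 <;> simp [hm, h]

theorem pvKeys_upd (l : List (String × String)) (d : PySem.Dict String String) :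
    (l.foldl pvUpd d).keys = PySem.Set.update d.keys (l.map (·.1)) := by
  have := PySem.Dict.keys_foldl_insert_key l (fun s => s.1)
      (fun d s => d.getD s.1 "" ++ s.2) d
  simpa [pvUpd] using this

theorem pvKeys_ini (l : List (String × String)) (d : PySem.Dict String String) :
    (l.foldl pvIni d).keys = PySem.Set.update d.keys (l.map (·.1)) := by
  have := PySem.Dict.keys_foldl_insert_key l (fun s => s.1)
      (fun _ _ => ("" : String)) d
  simpa [pvIni] using this

theorem pvUpdate_self (ks : List String) :
    PySem.Set.update (PySem.Set.ofList ks) ks = PySem.Set.ofList ks := by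
  rw [PySem.Set.update_eq_append_filter]
  have : List.filter (fun y => !(PySem.Set.ofList ks).contains y) (PySem.Set.ofList ks) = [] := by
    apply List.filter_eq_nil_iff.mpr
    intro y hy
    simp
    exact (PySem.Set.mem_ofList ks y).mp hy
  rw [this, List.append_nil]

-- A's nested folds are the pvIni / pvUpd folds over the flattened events
theorem pvFlattenIni (items : List (String × List String)) (d : PySem.Dict String String) :
    items.foldl (fun d p => p.2.foldl (fun d x => d.insert x "") d) d
      = (pvEvents items).foldl pvIni d := by
  rw [pvEvents, List.foldl_flatMap]
  refine PySem.List.foldl_congr_mem' _ _ _ _ ?_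
  intro p _ acc
  rw [List.foldl_map]
  simp [pvIni]

theorem pvFlattenUpd (items : List (String × List String)) (d : PySem.Dict String String) :
    items.foldl (fun d p => p.2.foldl (fun d x => d.insert x (d.getD x "" ++ p.1)) d) d
      = (pvEvents items).foldl pvUpd d := by
  rw [pvEvents, List.foldl_flatMap]
  refine PySem.List.foldl_congr_mem' _ _ _ _ ?_
  intro p _ acc
  rw [List.foldl_map]
  simp [pvUpd]

-- the dict lookup mrt[i] during iteration over the dict returns the item's own value
theorem pvLookup (m : PySem.Dict String (List String))
    (g : PySem.Dict String String → String → String → PySem.Dict String String)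
    (hnd : m.keys.Nodup) (d : PySem.Dict String String) :
    m.items.foldl (fun d p => (m.getD p.1 []).foldl (fun d x => g d x p.1) d) d
      = m.items.foldl (fun d p => p.2.foldl (fun d x => g d x p.1) d) d := by
  refine PySem.List.foldl_congr_mem' _ _ _ _ ?_
  intro p hp acc
  rw [PySem.Dict.getD_of_mem_items m (by exact hp) hnd]

-- B side: the station set is the set of flattened event stations
theorem pvStations (items : List (String × List String)) (s : PySem.Set String) :
    items.foldl (fun s p => p.2.foldl (fun s x => PySem.Set.add s x) s) s
      = ((pvEvents items).map (·.1)).foldl PySem.Set.add s := by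
  rw [pvEvents, List.map_flatMap, List.foldl_flatMap]
  refine PySem.List.foldl_congr_mem' _ _ _ _ ?_
  intro p _ acc
  rw [List.foldl_map, List.foldl_map]

-- one line's contribution to station x is line repeated (count x) times
theorem pvSegment (ys : List String) (i x : String) :
    pvCat (ys.map (fun y => (y, i))) x = pvStrMul i (ys.count x) := by
  induction ys with
  | nil => simp [pvCat, pvStrMul]
  | cons y ys ih =>
    simp only [List.map_cons, pvCat, ih, List.count_cons]
    by_cases h : y = x
    · subst h; simp [pvStrMul]
    · simp [fun hh => h (by simpa using hh)]

-- B's linesOf fold computes pvCat over the flattened events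
theorem pvLinesOf (items : List (String × List String)) (x : String) (acc : String) :
    items.foldl (fun acc p => acc ++ pvStrMul p.1 (p.2.count x)) acc
      = acc ++ pvCat (pvEvents items) x := by
  induction items generalizing acc with
  | nil => simp [pvEvents, pvCat]
  | cons p l ih =>
    simp only [List.foldl_cons, ih]
    have : pvEvents (p :: l) = p.2.map (fun y => (y, p.1)) ++ pvEvents l := by
      simp [pvEvents]
    rw [this, pvCat_append, pvSegment, String.append_assoc]

theorem get_stationline_spec : Claim_equal_get_stationline := by
  intro mrt _
  unfold Spec_get_stationline
  simp only [get_stationline, get_stationline_alt]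
  set m := PySem.Dict.ofList mrt with hm
  have hnd : m.keys.Nodup := PySem.Dict.nodup_keys_ofList mrt
  rw [pvLookup m (fun d x i => d.insert x "") hnd,
      pvLookup m (fun d x i => d.insert x (d.getD x "" ++ i)) hnd]
  rw [pvFlattenIni m.items, pvFlattenUpd m.items, pvStations m.items]
  set E := pvEvents m.items with hE
  -- A side: keys of the two folds
  have hk1 : (E.foldl pvIni PySem.Dict.empty).keys = PySem.Set.ofList (E.map (·.1)) := by
    rw [pvKeys_ini]; simp [PySem.Dict.keys_empty]; exact PySem.Set.update_nil_left _
  have hkA : (E.foldl pvUpd (E.foldl pvIni PySem.Dict.empty)).keys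
      = PySem.Set.ofList (E.map (·.1)) := by
    rw [pvKeys_upd, hk1, pvUpdate_self]
  have hndA : (E.foldl pvUpd (E.foldl pvIni PySem.Dict.empty)).keys.Nodup := by
    rw [hkA]; exact PySem.Set.nodup_ofList _
  -- B side: the station set
  have hkB : ((E.map (·.1)).foldl PySem.Set.add PySem.Set.empty : PySem.Set String)
      = PySem.Set.ofList (E.map (·.1)) := (PySem.Set.ofList_eq_foldl _).symm
  rw [PySem.Dict.items_eq_map_keys _ hndA "", hkA, hkB]
  refine List.map_congr_left ?_
  intro x _
  rw [pvGetD_upd, pvGetD_ini, pvLinesOf]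
  by_cases h : x ∈ E.map (·.1) <;> simp [h] <;> rfl
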